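-- pv_equiv track=rewrite | github.com/LeonardoRener/MC102-Algoritmos_e_Programacao_de_Computadores-1s2019 | Lab08/lab08.py | maisdano
-- ===== SOURCE A (Python) =====
-- def maisdano(n):     #funcao que ira verificar e aplicar as multiplicacoes
--     f = 0
--     if n < 0:
--         n = n * -1
--         f = 1
--     lista = []
--     for i in range(1,(n-1)):     #verifica se é perfeito
--         divisores = n % i
--         if divisores == 0:
--             lista.append(i)
--     soma = 0
--     for i in range(len(lista)):
--         b = lista[i]
--         soma = b + soma
--     if f == 1:
--         soma = soma * -1
--         n = n * -1
--     if soma == n: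
--         m = n * 3
--     else:                 #caso nao seja perfeito verifica se é triangular antes de sair da funçao
--         if n < 0:
--             n = n * -1
--             f = 1
--         soma = 0
--         for i in range(1, n):    #verifica se é triangular
--             if soma < n:
--                 soma += i
--         if f == 1:
--             soma = soma * -1
--             n = n * -1
--         if soma == n:
--             m = n * 2
--         else:
--             m = n
--     return(m)
-- ===== SOURCE B (Python) =====
-- def maisdano(n):
--     a = -n if n < 0 else n
--     s = 0
--     if a > 1:
--         s = 1
--         i = 2
--         while i * i <= a:
--             if a % i == 0:
--                 s += i
--                 q = a // i
--                 if q != i: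
--                     s += q
--             i += 1
--     if s == a:
--         return n * 3
--     k = 0
--     while k * (k + 1) // 2 < a:
--         k += 1
--     if k * (k + 1) // 2 == a:
--         return n * 2
--     return n
-- ===== Notes on version B (the rewrite author's own statement) =====
-- stated objective: faster
-- what changed: Replaces the O(n) trial-division-to-n-2 loop plus list-and-resum passes by a single O(sqrt n) paired-divisor sum, and the O(n) accumulate-until->=n triangular loop by an O(sqrt n) search for the first k with k(k+1)/2 >= n.
-- intended difference: On n = 1 and n = -1 A's triangular loop range(1, n) is empty, so A misses that 1 is triangular and returns n unchanged; B returns 2*n, the intended 'triangular, so scale by two' value since 1 = 1*(1+1)/2. — e.g. on maisdano(1): A returns 1, B returns 2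
import Mathlib
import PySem

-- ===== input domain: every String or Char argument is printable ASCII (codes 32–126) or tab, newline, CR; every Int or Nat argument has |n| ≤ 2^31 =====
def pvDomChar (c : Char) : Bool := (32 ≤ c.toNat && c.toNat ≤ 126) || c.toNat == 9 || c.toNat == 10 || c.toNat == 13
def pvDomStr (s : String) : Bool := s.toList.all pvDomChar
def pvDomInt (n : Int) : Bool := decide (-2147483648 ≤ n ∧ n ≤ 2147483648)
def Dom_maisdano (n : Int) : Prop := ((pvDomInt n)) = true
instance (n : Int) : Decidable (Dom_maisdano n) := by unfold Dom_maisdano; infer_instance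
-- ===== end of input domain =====

-- B replaces A's linear divisor scan and linear triangular accumulation by √n-bounded loops
-- (paired divisors; first k with k(k+1)/2 ≥ n); on n = ±1 B returns the intended 2n (1 is triangular), A returns n.


-- ===== PORT A =====
def maisdano (n : Int) : Int :=
  let f : Int := 0
  let nf := if n < 0 then (n * -1, (1 : Int)) else (n, f)
  let n := nf.1
  let f := nf.2
  let lista := (PySem.List.pyRange 1 (n - 1) 1).foldl
      (fun lista i => if PySem.Int.mod n i == 0 then lista ++ [i] else lista) ([] : List Int)
  let soma := (PySem.List.pyRange 0 (lista.length : Int) 1).foldl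
      (fun soma i => (PySem.List.pyGetD lista i 0) + soma) (0 : Int)
  let sn := if f == 1 then (soma * -1, n * -1) else (soma, n)
  let soma := sn.1
  let n := sn.2
  if soma == n then n * 3
  else
    let nf2 := if n < 0 then (n * -1, (1 : Int)) else (n, f)
    let n := nf2.1
    let soma := (PySem.List.pyRange 1 n 1).foldl
        (fun soma i => if soma < n then soma + i else soma) (0 : Int)
    let sn2 := if nf2.2 == 1 then (soma * -1, n * -1) else (soma, n)
    let soma := sn2.1
    let n := sn2.2
    if soma == n then n * 2 else n

-- ===== PORT B =====
-- while i*i <= a: collect divisor i and its cofactor a//i (once if they coincide);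
-- fuel a.toNat only makes the while loop structural (it is never exhausted: i stays ≤ √a + 1)
def divLoop : Nat → Int → Int → Int → Int
  | 0, _, _, s => s
  | fuel + 1, a, i, s =>
    if i * i ≤ a then
      divLoop fuel a (i + 1)
        (if PySem.Int.mod a i == 0 then
           (if PySem.Int.floordiv a i != i then s + i + PySem.Int.floordiv a i else s + i)
         else s)
    else s

-- while k*(k+1)//2 < a: k += 1; fuel (a+1).toNat only makes the loop structural (k stops by a)
def triLoop : Nat → Int → Int → Int
  | 0, _, k => k
  | fuel + 1, a, k =>
    if PySem.Int.floordiv (k * (k + 1)) 2 < a then triLoop fuel a (k + 1) else k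

def maisdano_alt (n : Int) : Int :=
  let a := if n < 0 then -n else n
  let s : Int := if a > 1 then divLoop a.toNat a 2 1 else 0
  if s == a then n * 3
  else
    let k := triLoop (a + 1).toNat a 0
    if PySem.Int.floordiv (k * (k + 1)) 2 == a then n * 2 else n

-- ===== PRECONDITION & SPEC =====
-- On n = 1 and n = -1 A's triangular loop range(1, n) is empty, so A misses that 1 is
-- triangular and returns n; B returns 2*n, the intended 'triangular, so scale by two' value.
def D_maisdano (n : Int) : Prop := n = 1 ∨ n = -1
instance (n : Int) : Decidable (D_maisdano n) := by unfold D_maisdano; infer_instance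

def Spec_maisdano (n : Int) (out : Int) : Prop := ¬ D_maisdano n → out = maisdano_alt n
instance (n : Int) (out : Int) : Decidable (Spec_maisdano n out) := by unfold Spec_maisdano; infer_instance

def pvDiffWitness_maisdano : Int := 1
def pvDiffWitnessOut_maisdano : Int × Int := (1, 2)

-- ===== CLAIM (what is proved, stated in full; the proofs are below) =====
def Claim_unchanged_maisdano : Prop := ∀ (n : Int), Dom_maisdano n → Spec_maisdano n (maisdano n)
def Claim_changed_maisdano : Prop := Dom_maisdano (pvDiffWitness_maisdano) ∧ D_maisdano (pvDiffWitness_maisdano) ∧ maisdano (pvDiffWitness_maisdano) = pvDiffWitnessOut_maisdano.1 ∧ maisdano_alt (pvDiffWitness_maisdano) = pvDiffWitnessOut_maisdano.2 ∧ pvDiffWitnessOut_maisdano.1 ≠ pvDiffWitnessOut_maisdano.2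
def Claim_exact_maisdano : Prop := ∀ (n : Int), Dom_maisdano n → D_maisdano n → maisdano n ≠ maisdano_alt n

-- ===== LEMMAS AND PROOFS =====

-- A's second loop (summing lista back to front) is c + sum
theorem foldl_flip_add (l : List Int) (c : Int) : l.foldl (fun s b => b + s) c = c + l.sum := by
  induction l generalizing c with
  | nil => simp
  | cons x t ih => simp [List.foldl_cons, ih (x + c)]; ring

-- the proper divisors of m ≥ 3 are exactly its divisors ≤ m - 2 (m-1 never divides m)
theorem properDivisors_eq_le_sub_two (m : Nat) (hm : 3 ≤ m) (j : Nat) :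
    m.divisors.filter (fun d => j ≤ d ∧ d + 2 ≤ m) = m.properDivisors.filter (fun d => j ≤ d) := by
  ext d
  simp only [Finset.mem_filter, Nat.mem_divisors, Nat.mem_properDivisors]
  constructor
  · rintro ⟨⟨hd, h0⟩, hj, h2⟩
    exact ⟨⟨hd, by omega⟩, hj⟩
  · rintro ⟨⟨hd, hlt⟩, hj⟩
    refine ⟨⟨hd, by omega⟩, hj, ?_⟩
    by_contra hbig
    have hdm : d = m - 1 := by omega
    subst hdm
    have h1 : (m - 1) ∣ (m - (m - 1)) := Nat.dvd_sub hd dvd_rfl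
    have h2 : m - (m - 1) = 1 := by omega
    rw [h2] at h1
    have := Nat.le_of_dvd one_pos h1
    omega

-- A's first loop: the filtered range sums to the divisors of m in [j, m-2]
theorem Afilter_sum (m : Nat) : ∀ (fuel j : Nat), 1 ≤ j → m - j ≤ fuel →
    ((PySem.List.pyRange (j : Int) ((m : Int) - 1) 1).filter
        (fun i => PySem.Int.mod (m : Int) i == 0)).sum
      = ((∑ d ∈ m.divisors.filter (fun d => j ≤ d ∧ d + 2 ≤ m), d : Nat) : Int) := by
  intro fuel
  induction fuel with
  | zero =>
    intro j hj hf
    have hje : j ≥ m := by omega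
    rw [PySem.List.pyRange_one_eq_nil (by omega)]
    have hempty : m.divisors.filter (fun d => j ≤ d ∧ d + 2 ≤ m) = ∅ := by
      apply Finset.filter_false_of_mem
      intro d hd
      rintro ⟨h1, h2⟩
      omega
    simp [hempty]
  | succ fuel ih =>
    intro j hj hf
    by_cases hlt : (j : Int) < (m : Int) - 1
    · have hjm : j + 2 ≤ m := by omega
      rw [PySem.List.pyRange_one_cons hlt]
      rw [show ((j : Nat) : Int) + 1 = ((j + 1 : Nat) : Int) by push_cast; ring]
      by_cases hdvd : j ∣ m
      · have hsplit : m.divisors.filter (fun d => j ≤ d ∧ d + 2 ≤ m)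
            = insert j (m.divisors.filter (fun d => j + 1 ≤ d ∧ d + 2 ≤ m)) := by
          ext d
          simp only [Finset.mem_insert, Finset.mem_filter, Nat.mem_divisors]
          constructor
          · rintro ⟨h1, h2, h3⟩
            by_cases hd : d = j
            · exact Or.inl hd
            · exact Or.inr ⟨h1, by omega, h3⟩
          · rintro (rfl | ⟨h1, h2, h3⟩)
            · exact ⟨⟨hdvd, by omega⟩, le_refl _, hjm⟩
            · exact ⟨h1, by omega, h3⟩
        have hmod : (PySem.Int.mod (m : Int) (j : Int) == 0) = true := by
          simp only [beq_iff_eq, PySem.Int.mod_eq_zero_iff_dvd]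
          exact_mod_cast hdvd
        rw [List.filter_cons, if_pos hmod, List.sum_cons, ih (j + 1) (by omega) (by omega),
            hsplit, Finset.sum_insert (by simp)]
        push_cast
        ring
      · have hsame : m.divisors.filter (fun d => j ≤ d ∧ d + 2 ≤ m)
            = m.divisors.filter (fun d => j + 1 ≤ d ∧ d + 2 ≤ m) := by
          apply Finset.filter_congr
          intro d hd
          have hdd := (Nat.mem_divisors.mp hd).1
          constructor
          · rintro ⟨h1, h2⟩
            have : d ≠ j := by rintro rfl; exact hdvd hdd
            exact ⟨by omega, h2⟩
          · rintro ⟨h1, h2⟩; exact ⟨by omega, h2⟩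
        have hmod : (PySem.Int.mod (m : Int) (j : Int) == 0) = false := by
          simp only [beq_eq_false_iff_ne, ne_eq, PySem.Int.mod_eq_zero_iff_dvd]
          intro hc
          exact hdvd (by exact_mod_cast hc)
        rw [List.filter_cons, if_neg (by rw [hmod]; simp), ih (j + 1) (by omega) (by omega), hsame]
    · rw [PySem.List.pyRange_one_eq_nil (by omega)]
      have hempty : m.divisors.filter (fun d => j ≤ d ∧ d + 2 ≤ m) = ∅ := by
        apply Finset.filter_false_of_mem
        intro d hd
        rintro ⟨h1, h2⟩
        have : (j : Int) < (m : Int) - 1 := by omega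
        omega
      simp [hempty]

-- B's divisor loop: the paired-divisor sum over divisors d ∈ [j, √m]
theorem divLoop_eq (m : Nat) : ∀ (fuel j : Nat) (s : Int), 1 ≤ j → m + 1 - j ≤ fuel →
    divLoop fuel (m : Int) (j : Int) s
      = s + ((∑ d ∈ m.divisors.filter (fun d => j ≤ d ∧ d * d ≤ m),
              (d + if m / d ≠ d then m / d else 0) : Nat) : Int) := by
  intro fuel
  induction fuel with
  | zero =>
    intro j s hj hf
    have hempty : m.divisors.filter (fun d => j ≤ d ∧ d * d ≤ m) = ∅ := by
      apply Finset.filter_false_of_mem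
      intro d hd
      have := Nat.mem_divisors.mp hd
      have hdm : d ≤ m := Nat.le_of_dvd (Nat.pos_of_ne_zero this.2) this.1
      intro hcon
      omega
    simp [divLoop, hempty]
  | succ fuel ih =>
    intro j s hj hf
    by_cases hjj : j * j ≤ m
    · have hjj' : (j : Int) * (j : Int) ≤ (m : Int) := by exact_mod_cast hjj
      have hm0 : m ≠ 0 := by
        have h1 : 1 * 1 ≤ j * j := Nat.mul_le_mul hj hj
        omega
      simp only [divLoop, if_pos hjj']
      rw [show ((j : Nat) : Int) + 1 = ((j + 1 : Nat) : Int) by push_cast; ring]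
      rw [ih (j + 1) _ (by omega) (by omega)]
      -- split the RHS filter at d = j
      by_cases hdvd : j ∣ m
      · have hsplit : m.divisors.filter (fun d => j ≤ d ∧ d * d ≤ m)
            = insert j (m.divisors.filter (fun d => j + 1 ≤ d ∧ d * d ≤ m)) := by
          ext d
          simp only [Finset.mem_insert, Finset.mem_filter, Nat.mem_divisors]
          constructor
          · rintro ⟨h1, h2, h3⟩
            by_cases hd : d = j
            · exact Or.inl hd
            · exact Or.inr ⟨h1, by omega, h3⟩
          · rintro (rfl | ⟨h1, h2, h3⟩)
            · exact ⟨⟨hdvd, hm0⟩, le_refl _, hjj⟩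
            · exact ⟨h1, by omega, h3⟩
        rw [hsplit, Finset.sum_insert (by simp)]
        have hmod : PySem.Int.mod (m : Int) (j : Int) == 0 := by
          simp
          exact_mod_cast hdvd
        rw [if_pos hmod]
        have hfd : PySem.Int.floordiv (m : Int) (j : Int) = ((m / j : Nat) : Int) :=
          PySem.Int.floordiv_natCast m j
        by_cases hq : m / j = j
        · rw [if_neg (by simp [hfd, hq]), if_neg (by omega)]
          push_cast
          ring
        · rw [if_pos (by simp [hfd]; exact_mod_cast hq), if_pos hq, hfd]
          push_cast
          ring
      · have hsame : m.divisors.filter (fun d => j ≤ d ∧ d * d ≤ m)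
            = m.divisors.filter (fun d => j + 1 ≤ d ∧ d * d ≤ m) := by
          apply Finset.filter_congr
          intro d hd
          have hdd := (Nat.mem_divisors.mp hd).1
          constructor
          · rintro ⟨h1, h2⟩
            have : d ≠ j := by rintro rfl; exact hdvd hdd
            exact ⟨by omega, h2⟩
          · rintro ⟨h1, h2⟩; exact ⟨by omega, h2⟩
        have hmod : ¬ (PySem.Int.mod (m : Int) (j : Int) == 0) = true := by
          simp
          intro hc
          exact hdvd (by exact_mod_cast hc)
        rw [if_neg (by simpa using hmod), hsame]
    · have hjj' : ¬ (j : Int) * (j : Int) ≤ (m : Int) := by exact_mod_cast hjj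
      have hempty : m.divisors.filter (fun d => j ≤ d ∧ d * d ≤ m) = ∅ := by
        apply Finset.filter_false_of_mem
        intro d hd
        rintro ⟨h1, h2⟩
        have : j * j ≤ d * d := Nat.mul_le_mul h1 h1
        omega
      simp [divLoop, if_neg hjj', hempty]

-- the divisor pairing d ↔ m/d: B's paired sum equals the proper-divisor sum
theorem pairing (m : Nat) (hm : 2 ≤ m) :
    (∑ d ∈ m.properDivisors, d)
      = 1 + ∑ d ∈ m.divisors.filter (fun d => 2 ≤ d ∧ d * d ≤ m),
              (d + if m / d ≠ d then m / d else 0) := by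
  have hm0 : m ≠ 0 := by omega
  -- Small: divisors d with 2 ≤ d, d² ≤ m; Small': d² < m; Large: divisors e with e² > m, e ≠ m
  set Small := m.divisors.filter (fun d => 2 ≤ d ∧ d * d ≤ m) with hS
  set Small' := m.divisors.filter (fun d => 2 ≤ d ∧ d * d < m) with hS'
  set Large := m.divisors.filter (fun e => 2 ≤ e ∧ m < e * e ∧ e ≠ m) with hL
  -- step 1: the paired sum splits
  have h1 : ∑ d ∈ Small, (d + if m / d ≠ d then m / d else 0)
      = (∑ d ∈ Small, d) + ∑ d ∈ Small', m / d := by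
    rw [Finset.sum_add_distrib]
    congr 1
    rw [hS, hS', Finset.sum_filter, Finset.sum_filter]
    apply Finset.sum_congr rfl
    intro d hd
    have hdvd := (Nat.mem_divisors.mp hd).1
    by_cases h2 : 2 ≤ d
    · by_cases hlt : d * d < m
      · have hne : m / d ≠ d := by
          intro hc
          have := Nat.mul_div_cancel' hdvd
          rw [hc] at this
          omega
        simp [h2, hlt, hne, Nat.le_of_lt hlt]
      · by_cases hle : d * d ≤ m
        · have heq : d * d = m := by omega
          have hq : m / d = d := by
            rw [← heq]
            exact Nat.mul_div_cancel_left d (by omega)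
          simp [h2, hlt, hle, hq]
        · simp [h2, hlt, hle]
    · simp [h2]
  -- step 2: Small' sums of cofactors = Large sums
  have h2 : (∑ d ∈ Small', m / d) = ∑ e ∈ Large, e := by
    apply Finset.sum_nbij' (fun d => m / d) (fun e => m / e)
    · intro d hd
      simp only [hS', Finset.mem_filter, Nat.mem_divisors] at hd
      obtain ⟨⟨hdvd, _⟩, hd2, hdd⟩ := hd
      obtain ⟨e, he⟩ := hdvd
      have hd0 : 0 < d := by omega
      have hde : m / d = e := by rw [he]; exact Nat.mul_div_cancel_left e hd0
      have hlt : d < e := by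
        by_contra hc
        have hc' : e ≤ d := by omega
        have : e * d ≤ d * d := Nat.mul_le_mul hc' (le_refl d)
        nlinarith [he]
      simp only [hL, Finset.mem_filter, Nat.mem_divisors, hde]
      refine ⟨⟨Dvd.intro d (by rw [he]; ring), hm0⟩, by omega, ?_, ?_⟩
      · nlinarith [he]
      · intro hc
        rw [hc] at he
        nlinarith [he]
    · intro e he
      simp only [hL, Finset.mem_filter, Nat.mem_divisors] at he
      obtain ⟨⟨hdvd, _⟩, he2, hee, hem⟩ := he
      obtain ⟨d, hd⟩ := hdvd
      have he0 : 0 < e := by omega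
      have hed : m / e = d := by rw [hd]; exact Nat.mul_div_cancel_left d he0
      have hlt : d < e := by nlinarith [hd]
      have hd2 : 2 ≤ d := by
        rcases Nat.lt_or_ge d 2 with h | h
        · interval_cases d
          · omega
          · omega
        · exact h
      simp only [hS', Finset.mem_filter, Nat.mem_divisors, hed]
      exact ⟨⟨Dvd.intro e (by rw [hd]; ring), hm0⟩, hd2, by nlinarith [hd]⟩
    · intro d hd
      simp only [hS', Finset.mem_filter, Nat.mem_divisors] at hd
      exact Nat.div_div_self hd.1.1 hm0
    · intro e he
      simp only [hL, Finset.mem_filter, Nat.mem_divisors] at he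
      exact Nat.div_div_self he.1.1 hm0
    · intro d hd; rfl
  -- step 3: properDivisors = {1} ∪ Small ∪ Large
  have h3 : (∑ d ∈ m.properDivisors, d) = 1 + ((∑ d ∈ Small, d) + ∑ e ∈ Large, e) := by
    rw [← Finset.sum_filter_add_sum_filter_not m.properDivisors (fun d => d = 1)]
    have e1 : m.properDivisors.filter (fun d => d = 1) = {1} := by
      ext d
      simp only [Finset.mem_filter, Nat.mem_properDivisors, Finset.mem_singleton]
      constructor
      · rintro ⟨_, rfl⟩; rfl
      · rintro rfl
        exact ⟨⟨one_dvd m, by omega⟩, rfl⟩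
    rw [e1, Finset.sum_singleton]
    congr 1
    rw [← Finset.sum_filter_add_sum_filter_not (m.properDivisors.filter (fun d => d ≠ 1)) (fun d => d * d ≤ m)]
    congr 1
    · congr 1
      ext d
      simp only [hS, Finset.mem_filter, Nat.mem_properDivisors, Nat.mem_divisors]
      constructor
      · rintro ⟨⟨⟨hdvd, hlt⟩, hne⟩, hle⟩
        have h1 : 1 ≤ d := Nat.one_le_iff_ne_zero.mpr (by rintro rfl; simp at hdvd; omega)
        exact ⟨⟨hdvd, hm0⟩, by omega, hle⟩
      · rintro ⟨⟨hdvd, _⟩, h2, hle⟩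
        have : d < m := by nlinarith
        exact ⟨⟨⟨hdvd, this⟩, by omega⟩, hle⟩
    · congr 1
      ext d
      simp only [hL, Finset.mem_filter, Nat.mem_properDivisors, Nat.mem_divisors]
      constructor
      · rintro ⟨⟨⟨hdvd, hlt⟩, hne⟩, hgt⟩
        have h1 : 1 ≤ d := Nat.one_le_iff_ne_zero.mpr (by rintro rfl; simp at hdvd; omega)
        exact ⟨⟨hdvd, hm0⟩, by omega, by omega, by omega⟩
      · rintro ⟨⟨hdvd, _⟩, h2, hgt, hnem⟩
        have hle : d ≤ m := Nat.le_of_dvd (by omega) hdvd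
        exact ⟨⟨⟨hdvd, by omega⟩, by omega⟩, by omega⟩
  rw [h3, h1, h2]

-- T-number helpers
theorem T_succ (k : Int) :
    PySem.Int.floordiv ((k + 1) * ((k + 1) + 1)) 2
      = PySem.Int.floordiv (k * (k + 1)) 2 + (k + 1) := by
  rcases Int.even_mul_succ_self k with ⟨r, hr⟩
  have h1 : (k + 1) * ((k + 1) + 1) = k * (k + 1) + 2 * (k + 1) := by ring
  rw [PySem.Int.floordiv_eq_ediv_of_pos (by omega), PySem.Int.floordiv_eq_ediv_of_pos (by omega), h1]
  omega

theorem T_lower (a : Int) (ha : 3 ≤ a) :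
    a ≤ PySem.Int.floordiv ((a - 1) * ((a - 1) + 1)) 2 := by
  rw [PySem.Int.le_floordiv_iff_mul_le (by omega)]
  nlinarith

-- once soma ≥ a, A's triangular loop no longer changes it
theorem foldl_tri_const (a : Int) : ∀ (xs : List Int) (s : Int), a ≤ s →
    xs.foldl (fun soma i => if soma < a then soma + i else soma) s = s := by
  intro xs
  induction xs with
  | nil => intro s _; rfl
  | cons x t ih =>
    intro s hs
    simp only [List.foldl_cons, if_neg (by omega : ¬ s < a)]
    exact ih s hs

-- A's triangular loop computes T k₀ for the first k₀ with T k₀ ≥ a (= B's triLoop result)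
theorem tri_step (a : Int) (ha : 3 ≤ a) : ∀ (fuel : Nat) (j : Int), 1 ≤ j → j ≤ a →
    PySem.Int.floordiv ((j - 1) * ((j - 1) + 1)) 2 < a → (a - j).toNat + 1 ≤ fuel →
    (PySem.List.pyRange j a 1).foldl (fun soma i => if soma < a then soma + i else soma)
        (PySem.Int.floordiv ((j - 1) * ((j - 1) + 1)) 2)
      = PySem.Int.floordiv (triLoop fuel a (j - 1) * (triLoop fuel a (j - 1) + 1)) 2 := by
  intro fuel
  induction fuel with
  | zero => intro j _ _ _ hf; omega
  | succ fuel ih =>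
    intro j hj hja hT hf
    have hunf : triLoop (fuel + 1) a (j - 1)
        = if PySem.Int.floordiv ((j - 1) * ((j - 1) + 1)) 2 < a
          then triLoop fuel a ((j - 1) + 1) else (j - 1) := rfl
    rcases eq_or_lt_of_le hja with heq | hlt
    · exfalso
      have h2 := T_lower a ha
      rw [heq] at hT
      omega
    · have hr : j - 1 + 1 = j := by ring
      have hx : (j - 1) * ((j - 1) + 1) = (j - 1) * j := by ring
      rw [PySem.List.pyRange_one_cons hlt, List.foldl_cons]
      rw [hx] at hT hunf ⊢
      rw [if_pos hT]
      have hTj : PySem.Int.floordiv ((j - 1) * j) 2 + j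
          = PySem.Int.floordiv (j * (j + 1)) 2 := by
        have h := T_succ (j - 1)
        rw [hr] at h
        omega
      rw [hTj, hunf, if_pos hT, hr]
      by_cases hTlt : PySem.Int.floordiv (j * (j + 1)) 2 < a
      · have hrec := ih (j + 1) (by omega) (by omega)
          (by rw [show j + 1 - 1 = j by ring]; exact hTlt) (by omega)
        rw [show j + 1 - 1 = j by ring] at hrec
        exact hrec
      · rw [foldl_tri_const a _ _ (by omega)]
        rcases Nat.exists_eq_succ_of_ne_zero (show fuel ≠ 0 by omega) with ⟨f', rfl⟩
        have hunf2 : triLoop (f' + 1) a j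
            = if PySem.Int.floordiv (j * (j + 1)) 2 < a then triLoop f' a (j + 1) else j := rfl
        rw [hunf2, if_neg hTlt]

-- A's first two loops compute the proper-divisor sum of m
theorem somaA (m : Nat) (hm : 3 ≤ m) :
    (PySem.List.pyRange 0 (((PySem.List.pyRange 1 ((m : Int) - 1) 1).foldl
          (fun lista i => if PySem.Int.mod (m : Int) i == 0 then lista ++ [i] else lista)
          ([] : List Int)).length : Int) 1).foldl
        (fun soma i => (PySem.List.pyGetD ((PySem.List.pyRange 1 ((m : Int) - 1) 1).foldl
          (fun lista i => if PySem.Int.mod (m : Int) i == 0 then lista ++ [i] else lista)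
          ([] : List Int)) i 0) + soma) (0 : Int)
      = ((∑ d ∈ m.properDivisors, d : Nat) : Int) := by
  have hlista : (PySem.List.pyRange 1 ((m : Int) - 1) 1).foldl
      (fun lista i => if PySem.Int.mod (m : Int) i == 0 then lista ++ [i] else lista)
      ([] : List Int)
      = (PySem.List.pyRange 1 ((m : Int) - 1) 1).filter (fun i => PySem.Int.mod (m : Int) i == 0) := by
    have h := PySem.List.foldl_append_if (fun i => PySem.Int.mod (m : Int) i == 0)
        (fun i => i) (PySem.List.pyRange 1 ((m : Int) - 1) 1) ([] : List Int)
    simpa using h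
  rw [hlista]
  have h2 := PySem.List.foldl_pyRange_zero_pyGetD'
      ((PySem.List.pyRange 1 ((m : Int) - 1) 1).filter (fun i => PySem.Int.mod (m : Int) i == 0))
      (0 : Int) (fun (s b : Int) => b + s) (0 : Int)
  rw [h2, foldl_flip_add, zero_add]
  have hA := Afilter_sum m m 1 (by omega) (by omega)
  rw [Nat.cast_one] at hA
  rw [hA]
  congr 1
  rw [properDivisors_eq_le_sub_two m hm 1]
  apply Finset.sum_congr _ (fun x _ => rfl)
  apply Finset.filter_true_of_mem
  intro d hd
  have := (Nat.mem_properDivisors.mp hd).1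
  have hm0 : m ≠ 0 := by omega
  exact Nat.one_le_iff_ne_zero.mpr (by rintro rfl; rw [Nat.zero_dvd] at this; omega)

-- B's divisor loop computes the proper-divisor sum of m
theorem sB (m : Nat) (hm : 3 ≤ m) :
    divLoop m (m : Int) 2 1 = ((∑ d ∈ m.properDivisors, d : Nat) : Int) := by
  have h := divLoop_eq m m 2 1 (by omega) (by omega)
  rw [show ((2 : Nat) : Int) = (2 : Int) by norm_num] at h
  rw [h, pairing m (by omega), Nat.cast_add, Nat.cast_one]

theorem maisdano_main (n : Int) (h : ¬ D_maisdano n) : maisdano n = maisdano_alt n := by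
  unfold D_maisdano at h
  by_cases hsmall : -2 ≤ n ∧ n ≤ 2
  · have hn : n = -2 ∨ n = -1 ∨ n = 0 ∨ n = 1 ∨ n = 2 := by omega
    rcases hn with rfl | rfl | rfl | rfl | rfl
    · decide
    · exact absurd (Or.inr rfl) h
    · decide
    · exact absurd (Or.inl rfl) h
    · decide
  · by_cases hneg : n < 0
    · obtain ⟨m, rfl⟩ : ∃ m : Nat, n = -(m : Int) := ⟨(-n).toNat, by omega⟩
      have hm3 : 3 ≤ m := by
        by_contra hc
        have : (m : Int) ≤ 2 := by exact_mod_cast (by omega : m ≤ 2)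
        omega
      have hm1 : (1 : Int) < (m : Int) := by exact_mod_cast (by omega : 1 < m)
      have hma : (3 : Int) ≤ (m : Int) := by exact_mod_cast hm3
      have hneg' : -(m : Int) < 0 := by omega
      simp only [maisdano, maisdano_alt, if_pos hneg]
      simp only [mul_neg_one, neg_neg]
      simp only [show ((1 : Int) == 1) = true by decide, if_true]
      simp only [hneg', if_true]
      simp only [neg_neg]
      rw [if_pos hm1, Int.toNat_natCast]
      rw [somaA m hm3, sB m hm3]
      have hT0 : PySem.Int.floordiv (((1 : Int) - 1) * (((1 : Int) - 1) + 1)) 2 = 0 := by decide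
      have htri := tri_step (m : Int) hma (m + 1) 1 (by norm_num) (by omega)
        (by rw [hT0]; omega) (by omega)
      rw [hT0, show (1 : Int) - 1 = 0 by ring] at htri
      rw [show ((m : Int) + 1) = ((m + 1 : Nat) : Int) by push_cast; ring, Int.toNat_natCast]
      rw [htri]
      simp only [beq_iff_eq, if_true, neg_inj]
    · obtain ⟨m, rfl⟩ : ∃ m : Nat, n = (m : Int) := ⟨n.toNat, by omega⟩
      have hm3 : 3 ≤ m := by
        by_contra hc
        have : (m : Int) ≤ 2 := by exact_mod_cast by omega
        omega
      have hm1 : (1 : Int) < (m : Int) := by exact_mod_cast (by omega : 1 < m)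
      have hma : (3 : Int) ≤ (m : Int) := by exact_mod_cast hm3
      simp only [maisdano, maisdano_alt, if_neg hneg]
      simp only [show ((0 : Int) == 1) = false by decide, Bool.false_eq_true, if_false]
      rw [if_pos hm1, Int.toNat_natCast]
      rw [somaA m hm3, sB m hm3]
      simp only [if_neg hneg]
      simp only [show ((0 : Int) == 1) = false by decide, Bool.false_eq_true, if_false]
      have hT0 : PySem.Int.floordiv (((1 : Int) - 1) * (((1 : Int) - 1) + 1)) 2 = 0 := by decide
      have htri := tri_step (m : Int) hma (m + 1) 1 (by norm_num) (by omega)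
        (by rw [hT0]; omega) (by omega)
      rw [hT0, show (1 : Int) - 1 = 0 by ring] at htri
      rw [show ((m : Int) + 1) = ((m + 1 : Nat) : Int) by push_cast; ring, Int.toNat_natCast]
      rw [htri]


-- ===== VERDICT (by name: the statement is the Claim_ definition above) =====
theorem maisdano_spec : Claim_unchanged_maisdano := by
  intro n _ hD
  exact maisdano_main n hD

theorem maisdano_changed : Claim_changed_maisdano := by
  unfold Claim_changed_maisdano; decide

theorem maisdano_tight : Claim_exact_maisdano := by
  unfold Claim_exact_maisdano
  intro n _ hD
  rcases hD with h | h <;> subst h <;> decide
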